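-- pv_equiv track=rewrite | github.com/pypi-data/pypi-mirror-304 | packages/catpynet/catpynet-1.0.2.tar.gz/catpynet-1.0.2/catPyNet/model/DisjunctiveNormalForm.py | next_and
-- ===== SOURCE A (Python) =====
-- def next_and(expression: str, start_pos: int) -> int:
--     """
--     Return the postion of the next "&" after "start_pos" in "expression".
--
--     If no "&" is found returns -1 instead.
--     If no "&" is found before the next open bracket "(" returns -1 as well.
--
--     Parameters:
--         expression  (str): The string to be searched
--         start_pos   (int): The position at which searching starts.
--
--     Returns:
--         start_pos   (int): Position of the next "&"
--         -1          (int): Returned if no relevant "&" is found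
--     """
--     end_pos = len(expression) - 1
--     while start_pos <= end_pos:
--         if expression[start_pos] == "&":
--             return start_pos
--         elif expression[start_pos] == "(":
--             return -1
--         start_pos += 1
--
--     return -1
-- ===== SOURCE B (Python) =====
-- def next_and(expression: str, start_pos: int) -> int:
--     n = len(expression)
--     base = start_pos if start_pos >= 0 else max(n + start_pos, 0)
--     head = expression[base:].split('(', 1)[0]
--     amp = head.find('&')
--     return -1 if amp == -1 else base + amp
-- ===== Notes on version B (the rewrite author's own statement) =====
-- stated objective: simpler
-- what changed: Replaces A's interleaved character-by-character walk (testing each char against '&' and '(' inside one Python-level loop) with a staged truncate-then-search pipeline: slice the string at the start position, cut it at the first '(' with split('(', 1)[0], then search only that head for '&' (C-level string operations instead of a Python-level loop).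
-- intended difference: For negative start_pos in [-len, -1] whose wrap-around scan (tail then whole string) meets '&' before '(', A's negative-indexing accident returns a negative loop index (or rescans the whole string after the tail), e.g. -1 for ('a&', -2), while B returns the nonnegative position of the next '&' (or -1), which is the documented intent. — e.g. on next_and("a&", -2): A returns -1, B returns 1
-- crash fix: For start_pos < -len(expression) A raises IndexError (negative index out of range); B clamps the start like slicing does and returns the normal search result. — e.g. on next_and("", -1): A raises IndexError, B returns -1
import Mathlib
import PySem

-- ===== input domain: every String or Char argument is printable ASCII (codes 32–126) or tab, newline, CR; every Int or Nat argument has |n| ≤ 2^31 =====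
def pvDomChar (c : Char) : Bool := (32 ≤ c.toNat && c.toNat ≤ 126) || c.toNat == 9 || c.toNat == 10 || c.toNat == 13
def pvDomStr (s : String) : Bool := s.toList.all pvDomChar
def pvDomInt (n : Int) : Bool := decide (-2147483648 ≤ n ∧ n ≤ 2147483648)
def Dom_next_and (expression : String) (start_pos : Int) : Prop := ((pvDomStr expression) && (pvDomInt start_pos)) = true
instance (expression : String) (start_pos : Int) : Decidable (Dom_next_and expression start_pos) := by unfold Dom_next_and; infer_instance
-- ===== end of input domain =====

-- B replaces A's interleaved character walk by a staged pipeline — slice at the start position,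
-- cut at the first '(' (split('(',1)[0]), search the head for '&' (objective: simpler);
-- return values only (A mutates nothing).

-- ===== PORT A =====
-- the while loop of A: i is the running start_pos, endPos = len(expression) - 1
def nextAndLoop (expression : String) (endPos : Int) (i : Int) : Int :=
  if _h : i ≤ endPos then
    match PySem.Str.pyGet? expression i with
    | some c =>
      if c = '&' then i
      else if c = '(' then -1
      else nextAndLoop expression endPos (i + 1)
    | none => -1   -- Python raises IndexError here (start_pos < -len); these inputs are outside Pre_
  else -1
termination_by (endPos + 1 - i).toNat
decreasing_by omega

def next_and (expression : String) (start_pos : Int) : Int :=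
  nextAndLoop expression (PySem.Str.len expression - 1) start_pos

-- ===== PORT B =====
def next_and_alt (expression : String) (start_pos : Int) : Int :=
  let n : Int := PySem.Str.len expression
  let base : Int := if 0 ≤ start_pos then start_pos else max (n + start_pos) 0
  -- head = expression[base:].split('(', 1)[0]; split('(',1)[0] is exactly takeWhile (· ≠ '(')
  let head : List Char := (PySem.Chars.slice expression.toList (some base) none).takeWhile (· ≠ '(')
  let amp : Int := PySem.Chars.find head ['&']
  if amp = -1 then -1 else base + amp

-- ===== PRECONDITION & SPEC =====
-- Pre_ excludes exactly the inputs where A raises IndexError (negative index below -len).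
def Pre_next_and (expression : String) (start_pos : Int) : Prop :=
  -(expression.toList.length : Int) ≤ start_pos
instance (expression : String) (start_pos : Int) : Decidable (Pre_next_and expression start_pos) := by
  unfold Pre_next_and; infer_instance

def pvWitness_next_and : String × Int := ("a&(b", 0)

-- the first '&'-or-'(' character of a list: some (offset, true) = '&' first, some (offset, false) = '(' first
def pvScan : List Char → Option (Int × Bool)
  | [] => none
  | c :: t =>
    if c = '&' then some (0, true)
    else if c = '(' then some (0, false)
    else (pvScan t).map (fun p => (p.1 + 1, p.2))

def pvAmpFirst (t : List Char) : Bool :=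
  match pvScan t with
  | some (_, true) => true
  | _ => false

-- the wrap-around scan order A's negative indexing produces: the tail from len+start, then the whole string
def pvTailWrap (expression : String) (start_pos : Int) : List Char :=
  (expression.toList.drop (start_pos + expression.toList.length).toNat) ++ expression.toList

-- For negative start_pos in [-len, -1] whose wrap-around scan (tail then whole string) meets '&'
-- before '(', A's negative indexing returns a negative loop index or a rescan of the whole string,
-- while B returns the nonnegative position of the next '&' (or -1), the documented intent.
def D_next_and (expression : String) (start_pos : Int) : Prop :=
  start_pos < 0 ∧ -(expression.toList.length : Int) ≤ start_pos ∧
    pvAmpFirst (pvTailWrap expression start_pos) = true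
instance (expression : String) (start_pos : Int) : Decidable (D_next_and expression start_pos) := by
  unfold D_next_and; infer_instance

def Spec_next_and (expression : String) (start_pos : Int) (out : Int) : Prop :=
  ¬ D_next_and expression start_pos → out = next_and_alt expression start_pos
instance (expression : String) (start_pos : Int) (out : Int) : Decidable (Spec_next_and expression start_pos out) := by
  unfold Spec_next_and; infer_instance

def pvDiffWitness_next_and : String × Int := ("a&", -2)
def pvDiffWitnessOut_next_and : Int × Int := (-1, 1)

-- For start_pos < -len(expression) A raises IndexError; B clamps the start like slicing does and
-- returns the search result (checked below by the bottom theorem next_and_raises).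
def Raises_next_and (expression : String) (start_pos : Int) : Prop :=
  start_pos < -(expression.toList.length : Int)
instance (expression : String) (start_pos : Int) : Decidable (Raises_next_and expression start_pos) := by
  unfold Raises_next_and; infer_instance
def pvRaiseWitness_next_and : String × Int := ("", -1)
def pvRaiseWitnessOut_next_and : Int := -1

-- ===== CLAIM (what is proved, stated in full; the proofs are below) =====
def Claim_unchanged_next_and : Prop := ∀ (expression : String) (start_pos : Int), Dom_next_and expression start_pos → Pre_next_and expression start_pos → Spec_next_and expression start_pos (next_and expression start_pos)
def Claim_changed_next_and : Prop := Dom_next_and (pvDiffWitness_next_and.1) (pvDiffWitness_next_and.2) ∧ Pre_next_and (pvDiffWitness_next_and.1) (pvDiffWitness_next_and.2) ∧ D_next_and (pvDiffWitness_next_and.1) (pvDiffWitness_next_and.2) ∧ next_and (pvDiffWitness_next_and.1) (pvDiffWitness_next_and.2) = pvDiffWitnessOut_next_and.1 ∧ next_and_alt (pvDiffWitness_next_and.1) (pvDiffWitness_next_and.2) = pvDiffWitnessOut_next_and.2 ∧ pvDiffWitnessOut_next_and.1 ≠ pvDiffWitnessOut_next_and.2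
def Claim_exact_next_and : Prop := ∀ (expression : String) (start_pos : Int), Dom_next_and expression start_pos → Pre_next_and expression start_pos → D_next_and expression start_pos → next_and expression start_pos ≠ next_and_alt expression start_pos
def Claim_raises_next_and : Prop := (∀ (expression : String) (start_pos : Int), Dom_next_and expression start_pos → Raises_next_and expression start_pos → ¬ Pre_next_and expression start_pos) ∧ (Dom_next_and (pvRaiseWitness_next_and.1) (pvRaiseWitness_next_and.2) ∧ Raises_next_and (pvRaiseWitness_next_and.1) (pvRaiseWitness_next_and.2) ∧ next_and_alt (pvRaiseWitness_next_and.1) (pvRaiseWitness_next_and.2) = pvRaiseWitnessOut_next_and)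

-- ===== LEMMAS AND PROOFS =====

-- find on a singleton pattern is findIdx?
def pvFd (c : Char) (t : List Char) : Int :=
  match t.findIdx? (· == c) with
  | none => -1
  | some i => (i : Int)

theorem pv_prefix_singleton (c : Char) (u : List Char) : [c] <+: u ↔ u[0]? = some c := by
  cases u <;> simp [List.cons_prefix_cons, eq_comm]

theorem pv_find_singleton (t : List Char) (c : Char) : PySem.Chars.find t [c] = pvFd c t := by
  by_cases hm : c ∈ t
  · have hinf : [c] <:+: t := (List.singleton_infix_iff c t).2 hm
    have h0 : 0 ≤ PySem.Chars.find t [c] := (PySem.Chars.find_nonneg_iff t [c]).2 hinf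
    obtain ⟨hpre, hmin⟩ := PySem.Chars.find_spec h0
    have hget : t[(PySem.Chars.find t [c]).toNat]? = some c := by
      have := (pv_prefix_singleton c (t.drop (PySem.Chars.find t [c]).toNat)).1 hpre
      simpa [List.getElem?_drop] using this
    obtain ⟨hlt, hval⟩ := List.getElem?_eq_some_iff.1 hget
    have hidx : t.findIdx? (· == c) = some (PySem.Chars.find t [c]).toNat := by
      rw [List.findIdx?_eq_some_iff_getElem]
      refine ⟨hlt, by simp [hval], ?_⟩
      intro j hj
      have hj' := hmin j hj
      rw [pv_prefix_singleton] at hj'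
      simp only [List.getElem?_drop, Nat.add_zero] at hj'
      simp only [beq_iff_eq]
      intro heq
      exact hj' (by rw [List.getElem?_eq_some_iff]; exact ⟨lt_trans hj hlt, heq⟩)
    unfold pvFd
    rw [hidx]
    simp [Int.toNat_of_nonneg h0]
  · have h1 : PySem.Chars.find t [c] = -1 := (PySem.Chars.find_eq_neg_one_iff t [c]).2
      (fun h => hm ((List.singleton_infix_iff c t).1 h))
    have h2 : t.findIdx? (· == c) = none := List.findIdx?_eq_none_iff.2 (fun x hx => by
      simp only [beq_eq_false_iff_ne]; rintro rfl; exact hm hx)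
    unfold pvFd
    rw [h1, h2]

theorem pvScan_cons (c : Char) (t : List Char) :
    pvScan (c :: t) = (if c = '&' then some (0, true)
      else if c = '(' then some (0, false)
      else (pvScan t).map (fun p => (p.1 + 1, p.2))) := rfl

theorem pv_fd_cons (c a : Char) (t : List Char) :
    pvFd c (a :: t) = if a = c then 0 else (if pvFd c t = -1 then -1 else pvFd c t + 1) := by
  unfold pvFd
  rw [List.findIdx?_cons]
  by_cases h : a = c
  · simp [h]
  · simp only [beq_iff_eq, h, if_false]
    cases ht : t.findIdx? (· == c) <;> simp

theorem pv_scan_bounds (t : List Char) (j : Int) (b : Bool) (h : pvScan t = some (j, b)) :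
    0 ≤ j ∧ j < t.length := by
  induction t generalizing j b with
  | nil => simp [pvScan] at h
  | cons a t ih =>
    rw [pvScan_cons] at h
    split_ifs at h with h1 h2
    · simp at h ⊢; omega
    · simp at h ⊢; omega
    · cases ht : pvScan t with
      | none => rw [ht] at h; simp at h
      | some p =>
        rw [ht] at h
        obtain ⟨j', b'⟩ := p
        simp at h
        obtain ⟨hj, hb⟩ := h
        have := ih j' b' ht
        simp [List.length_cons]
        omega

theorem pv_scan_append (u v : List Char) :
    pvScan (u ++ v) = match pvScan u with
      | some r => some r
      | none => (pvScan v).map (fun p => (p.1 + u.length, p.2)) := by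
  induction u with
  | nil =>
    cases hv : pvScan v with
    | none => simp [pvScan, hv]
    | some p => cases p; simp [pvScan, hv]
  | cons a u ih =>
    simp only [List.cons_append]
    rw [pvScan_cons, pvScan_cons]
    split_ifs with h1 h2
    · rfl
    · rfl
    · rw [ih]
      cases hu : pvScan u with
      | some r => simp
      | none =>
        cases hv : pvScan v with
        | none => simp
        | some p => cases p; simp [add_assoc]

-- B's head search computes the '&'-before-'(' scan: finding '&' in the part before the
-- first '(' is exactly pvScan returning (j, true)
theorem pv_head_scan (t : List Char) :
    pvFd '&' (t.takeWhile (· ≠ '(')) =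
      (match pvScan t with | some (j, true) => j | _ => -1) := by
  induction t with
  | nil => simp [pvFd, pvScan]
  | cons a t ih =>
    rw [pvScan_cons]
    by_cases h2 : a = '('
    · subst h2
      simp [pvFd]
    · have htw : List.takeWhile (fun x => decide (x ≠ '(')) (a :: t)
          = a :: List.takeWhile (fun x => decide (x ≠ '(')) t := by
        simp [h2]
      rw [htw, pv_fd_cons]
      by_cases h1 : a = '&'
      · simp [h1]
      · simp only [if_neg h1, if_neg h2, ih]
        cases hs : pvScan t with
        | none => simp
        | some p =>
          obtain ⟨j, b⟩ := p
          have hjb := pv_scan_bounds t j b hs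
          cases b
          · simp
          · simp; omega

theorem pv_len_eq (e : String) : PySem.Str.len e = (e.toList.length : Int) := by
  simp [PySem.Str.len_eq]

-- B's body, once the base index is resolved to a natural number
theorem pv_alt_body (e : String) (st : Int) (b : Nat)
    (hb : (if 0 ≤ st then st else max ((e.toList.length : Int) + st) 0) = (b : Int)) :
    next_and_alt e st =
      (match pvScan (e.toList.drop b) with
        | some (j, true) => (b : Int) + j
        | _ => -1) := by
  simp only [next_and_alt, pv_len_eq]
  rw [hb, PySem.Chars.slice_eq_listSlice, PySem.List.slice_from_natCast,
     pv_find_singleton, pv_head_scan]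
  cases hs : pvScan (e.toList.drop b) with
  | none => simp
  | some p =>
    obtain ⟨j, bo⟩ := p
    have hjb := pv_scan_bounds _ j bo hs
    cases bo
    · simp
    · simp; omega

-- A's loop from a nonnegative index
theorem pv_loop_nat (e : String) (m k : Nat) (hm : e.toList.length - k ≤ m) :
    nextAndLoop e ((e.toList.length : Int) - 1) (k : Int) =
      (match pvScan (e.toList.drop k) with
        | some (j, true) => (k : Int) + j
        | _ => -1) := by
  induction m generalizing k with
  | zero =>
    have hk : e.toList.length ≤ k := by omega
    rw [nextAndLoop]
    rw [dif_neg (by omega)]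
    rw [List.drop_eq_nil_of_le hk]
    rfl
  | succ m ih =>
    by_cases hk : e.toList.length ≤ k
    · rw [nextAndLoop, dif_neg (by omega), List.drop_eq_nil_of_le hk]
      rfl
    · push Not at hk
      rw [nextAndLoop, dif_pos (by omega)]
      rw [PySem.Str.pyGet?_natCast]
      rw [List.getElem?_eq_getElem hk]
      have hdrop : e.toList.drop k = e.toList[k] :: e.toList.drop (k + 1) :=
        (List.drop_eq_getElem_cons hk).symm ▸ rfl
      rw [hdrop, pvScan_cons]
      by_cases h1 : e.toList[k] = '&'
      · simp [h1]
      · by_cases h2 : e.toList[k] = '('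
        · simp [h1, h2]
        · simp only [if_neg h1, if_neg h2]
          have := ih (k + 1) (by omega)
          push_cast at this ⊢
          rw [this]
          cases hs : pvScan (e.toList.drop (k + 1)) with
          | none => simp
          | some p => obtain ⟨j, b⟩ := p; cases b <;> simp <;> ring

-- A's loop from a negative index: scan the tail (returning the negative loop variable on '&'),
-- then fall through to index 0
theorem pv_loop_neg (e : String) (m : Nat) (i : Int) (h0 : -(e.toList.length : Int) ≤ i)
    (h1 : i < 0) (hm : (-i).toNat ≤ m) :
    nextAndLoop e ((e.toList.length : Int) - 1) i =
      (match pvScan (e.toList.drop (i + e.toList.length).toNat) with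
        | some (j, true) => i + j
        | some (_, false) => -1
        | none => nextAndLoop e ((e.toList.length : Int) - 1) 0) := by
  induction m generalizing i with
  | zero => omega
  | succ m ih =>
    have hn : 1 ≤ e.toList.length := by omega
    set n := e.toList.length with hnd
    set k : Nat := (i + n).toNat with hkd
    have hk : k < n := by omega
    rw [nextAndLoop, dif_pos (by omega)]
    rw [PySem.Str.pyGet?_eq]
    have hget : PySem.Chars.pyGet? e.toList i = some (e.toList[k]'hk) := by
      simp only [PySem.Chars.pyGet?_eq_listPyGet?, PySem.List.pyGet?, PySem.List.pyIdx?]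
      rw [if_neg (by omega), if_pos (by omega)]
      have : n - (-i).toNat = k := by omega
      rw [this]
      simp [List.getElem?_eq_getElem hk]
    rw [hget]
    have hdrop : e.toList.drop k = e.toList[k] :: e.toList.drop (k + 1) :=
      (List.drop_eq_getElem_cons hk).symm ▸ rfl
    rw [hdrop, pvScan_cons]
    by_cases hc1 : e.toList[k] = '&'
    · simp [hc1]
    · by_cases hc2 : e.toList[k] = '('
      · simp [hc1, hc2]
      · simp only [if_neg hc1, if_neg hc2]
        by_cases hi1 : i + 1 < 0
        · have hrec := ih (i + 1) (by omega) hi1 (by omega)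
          have hk1 : (i + 1 + (n : Int)).toNat = k + 1 := by omega
          rw [hrec, hk1]
          cases hs : pvScan (e.toList.drop (k + 1)) with
          | none => simp
          | some p =>
            obtain ⟨j, b⟩ := p
            cases b <;> simp <;> ring
        · have hi0 : i + 1 = 0 := by omega
          rw [hi0]
          have : e.toList.drop (k + 1) = [] := List.drop_eq_nil_of_le (by omega)
          rw [this]
          simp [pvScan]

-- ===== VERDICT (by name: the statement is the Claim_ definition above) =====
theorem next_and_spec : Claim_unchanged_next_and := by
  intro e st _ hPre hD
  unfold Pre_next_and at hPre
  rw [next_and, pv_len_eq]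
  set n := e.toList.length with hnd
  by_cases hneg : st < 0
  · -- negative start: Pre gives -n ≤ st, base = n + st
    rw [pv_loop_neg e (-st).toNat st hPre hneg (le_refl _)]
    rw [pv_alt_body e st (st + n).toNat (by rw [if_neg (by omega)]; omega)]
    unfold D_next_and at hD
    push Not at hD
    have hAmp : pvAmpFirst (pvTailWrap e st) = false := by
      cases hAF : pvAmpFirst (pvTailWrap e st)
      · rfl
      · exact absurd hAF (hD hneg hPre)
    unfold pvAmpFirst pvTailWrap at hAmp
    rw [pv_scan_append] at hAmp
    cases hs : pvScan (e.toList.drop (st + (n : Int)).toNat) with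
    | none =>
      rw [hs] at hAmp
      have hl0 := pv_loop_nat e n 0 (by omega)
      push_cast at hl0
      rw [hl0]
      simp only [List.drop_zero] at *
      cases hs2 : pvScan e.toList with
      | none => rfl
      | some p =>
        obtain ⟨j, b⟩ := p
        rw [hs2] at hAmp
        cases b
        · rfl
        · simp at hAmp
    | some p =>
      obtain ⟨j, b⟩ := p
      rw [hs] at hAmp
      cases b
      · rfl
      · simp at hAmp
  · -- 0 ≤ st
    have hst : st = ((st.toNat : Nat) : Int) := by omega
    rw [hst, pv_loop_nat e n st.toNat (by omega),
        pv_alt_body e ((st.toNat : Nat) : Int) st.toNat (by rw [if_pos (by omega)])]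

theorem next_and_changed : Claim_changed_next_and := by
  unfold Claim_changed_next_and
  refine ⟨by decide, by decide, by decide, ?_, by decide, by decide⟩
  show next_and "a&" (-2) = -1
  simp [next_and, nextAndLoop, PySem.Str.pyGet?, PySem.Str.len, PySem.List.pyGet?, PySem.List.pyIdx?]

theorem next_and_tight : Claim_exact_next_and := by
  intro e st _ hPre hD
  obtain ⟨hneg, hlo, hAmp⟩ := hD
  unfold Pre_next_and at hPre
  rw [next_and, pv_len_eq]
  set n := e.toList.length with hnd
  rw [pv_loop_neg e (-st).toNat st hPre hneg (le_refl _)]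
  rw [pv_alt_body e st (st + n).toNat (by rw [if_neg (by omega)]; omega)]
  unfold pvAmpFirst pvTailWrap at hAmp
  rw [pv_scan_append] at hAmp
  cases hs : pvScan (e.toList.drop (st + (n : Int)).toNat) with
  | none =>
    rw [hs] at hAmp
    have hl0 := pv_loop_nat e n 0 (by omega)
    push_cast at hl0
    rw [hl0]
    simp only [List.drop_zero] at *
    cases hs2 : pvScan e.toList with
    | none => rw [hs2] at hAmp; simp at hAmp
    | some p =>
      obtain ⟨j, b⟩ := p
      rw [hs2] at hAmp
      cases b
      · simp at hAmp
      · have hjb := pv_scan_bounds e.toList j true hs2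
        simp only [Int.reduceNeg, ne_eq]
        simp
        omega
  | some p =>
    obtain ⟨j, b⟩ := p
    rw [hs] at hAmp
    cases b
    · simp at hAmp
    · have hjb := pv_scan_bounds _ j true hs
      have hlen : (e.toList.drop (st + (n : Int)).toNat).length = n - (st + (n : Int)).toNat :=
        List.length_drop
      simp
      omega

theorem next_and_raises : Claim_raises_next_and := by
  unfold Claim_raises_next_and
  constructor
  · intro e st _ hR hP
    exact absurd hP (by unfold Pre_next_and; unfold Raises_next_and at hR; omega)
  · exact ⟨by decide, by decide, by decide⟩

-- self-check: the crash-fix witness lies inside Raises_ and B's port returns the stated value there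
theorem pv_raise_witness_ok :
    Raises_next_and pvRaiseWitness_next_and.1 pvRaiseWitness_next_and.2 ∧
      next_and_alt pvRaiseWitness_next_and.1 pvRaiseWitness_next_and.2 = pvRaiseWitnessOut_next_and := by
  have h := next_and_raises
  unfold Claim_raises_next_and at h
  exact h.2.2
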